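-- pv_equiv track=rewrite | github.com/pulsence/local-second-mind | lsm/utils/file_graph.py | _python_block_end
-- ===== SOURCE A (Python) =====
-- from typing import Any, Dict, Iterable, List, Optional, Sequence, Tuple
--
-- def _leading_indent(line: str) -> int:
--     expanded = line.replace("\t", "    ")
--     return len(expanded) - len(expanded.lstrip(" "))
--
-- def _python_block_end(lines: Sequence[str], start_idx: int, indent: int) -> int:
--     last_content = start_idx
--     for idx in range(start_idx + 1, len(lines)):
--         line = lines[idx]
--         if not line.strip():
--             continue
--         if _leading_indent(line) <= indent:
--             return last_content
--         last_content = idx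
--     return last_content
-- ===== SOURCE B (Python) =====
-- def _leading_indent(line: str) -> int:
--     expanded = line.replace("\t", "    ")
--     return len(expanded) - len(expanded.lstrip(" "))
--
-- def _python_block_end(lines, start_idx, indent):
--     # Collect the block's indices up to the first dedented non-blank line,
--     # then trim trailing blank lines by scanning the block backwards.
--     block = []
--     for idx in range(start_idx + 1, len(lines)):
--         line = lines[idx]
--         if line.strip() and _leading_indent(line) <= indent:
--             break
--         block.append(idx)
--     for idx in reversed(block):
--         if lines[idx].strip():
--             return idx
--     return start_idx
-- ===== Notes on version B (the rewrite author's own statement) =====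
-- stated objective: alternative
-- what changed: Replaces A's single forward pass with a last_content accumulator and mid-loop return by a boundary search that collects the block's indices, followed by a backward scan that trims trailing blank lines.
import Mathlib
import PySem

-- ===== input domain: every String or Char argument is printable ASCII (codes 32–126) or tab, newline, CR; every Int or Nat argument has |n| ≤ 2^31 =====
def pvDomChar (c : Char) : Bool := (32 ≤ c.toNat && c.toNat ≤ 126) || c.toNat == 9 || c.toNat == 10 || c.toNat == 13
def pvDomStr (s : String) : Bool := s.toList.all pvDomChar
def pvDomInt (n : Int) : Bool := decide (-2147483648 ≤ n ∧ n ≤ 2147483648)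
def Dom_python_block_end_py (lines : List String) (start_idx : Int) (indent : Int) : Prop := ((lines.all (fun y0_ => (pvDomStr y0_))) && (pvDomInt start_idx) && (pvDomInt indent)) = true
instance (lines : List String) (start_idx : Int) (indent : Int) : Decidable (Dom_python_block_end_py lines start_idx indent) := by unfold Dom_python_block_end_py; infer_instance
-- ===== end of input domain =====

-- B replaces A's accumulator-tracking single pass by a forward boundary search that
-- collects the block's indices followed by a backward trailing-blank trim (alternative
-- decomposition, same cost).


-- ===== PORT A =====
-- _leading_indent: replace tabs by 4 spaces; len(expanded) - len(expanded.lstrip(" ")).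
-- lstrip(" ") drops exactly the leading ' ' characters, ported by hand as dropWhile (· == ' ') (exact).
def leadingIndentPy (line : String) : Int :=
  let expanded := (PySem.Str.replace line "\t" "    ").toList
  (expanded.length : Int) - ((expanded.dropWhile (· == ' ')).length : Int)

def pyA_loop (lines : List String) (indent : Int) : List Int → Int → Int
  | [], last_content => last_content
  | idx :: rest, last_content =>
    let line := (PySem.List.pyGet? lines idx).getD ""
    if PySem.Str.len (PySem.Str.strip line) = 0 then pyA_loop lines indent rest last_content
    else if leadingIndentPy line ≤ indent then last_content
    else pyA_loop lines indent rest idx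

def python_block_end_py (lines : List String) (start_idx : Int) (indent : Int) : Int :=
  pyA_loop lines indent (PySem.List.pyRange (start_idx + 1) (lines.length : Int) 1) start_idx

-- ===== PORT B =====
-- forward pass of Source B: collect block indices until the first non-blank line at indent ≤ indent
def collectB (lines : List String) (indent : Int) : List Int → List Int
  | [] => []
  | idx :: rest =>
    let line := (PySem.List.pyGet? lines idx).getD ""
    if PySem.Str.len (PySem.Str.strip line) ≠ 0 ∧ leadingIndentPy line ≤ indent then []
    else idx :: collectB lines indent rest

-- backward pass of Source B: first non-blank index of the reversed block, else start_idx
def trimB (lines : List String) : List Int → Int → Int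
  | [], start_idx => start_idx
  | idx :: rest, start_idx =>
    if PySem.Str.len (PySem.Str.strip ((PySem.List.pyGet? lines idx).getD "")) ≠ 0 then idx
    else trimB lines rest start_idx

def python_block_end_py_alt (lines : List String) (start_idx : Int) (indent : Int) : Int :=
  trimB lines ((collectB lines indent (PySem.List.pyRange (start_idx + 1) (lines.length : Int) 1)).reverse) start_idx

-- ===== PRECONDITION & SPEC =====
-- Pre_ excludes only the inputs where Python A raises IndexError
-- (start_idx below -len(lines)-1, where lines[start_idx+1] is out of range); B raises there too.
def Pre_python_block_end_py (lines : List String) (start_idx : Int) (indent : Int) : Prop :=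
  -((lines.length : Int) + 1) ≤ start_idx
instance (lines : List String) (start_idx : Int) (indent : Int) : Decidable (Pre_python_block_end_py lines start_idx indent) := by unfold Pre_python_block_end_py; infer_instance

def pvWitness_python_block_end_py : List String × Int × Int := (["def f():", "    x = 1", "", "    y = 2", "z = 3"], 0, 0)

def Spec_python_block_end_py (lines : List String) (start_idx : Int) (indent : Int) (out : Int) : Prop := out = python_block_end_py_alt lines start_idx indent
instance (lines : List String) (start_idx : Int) (indent : Int) (out : Int) : Decidable (Spec_python_block_end_py lines start_idx indent out) := by unfold Spec_python_block_end_py; infer_instance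

-- ===== CLAIM (what is proved, stated in full; the proofs are below) =====
def Claim_equal_python_block_end_py : Prop := ∀ (lines : List String) (start_idx : Int) (indent : Int), Dom_python_block_end_py lines start_idx indent → Pre_python_block_end_py lines start_idx indent → Spec_python_block_end_py lines start_idx indent (python_block_end_py lines start_idx indent)

-- ===== LEMMAS AND PROOFS =====

-- appending one more (earliest) index to the backward scan only changes the default
lemma trimB_append (lines : List String) (X : List Int) (i start_idx : Int) :
    trimB lines (X ++ [i]) start_idx =
      trimB lines X (if PySem.Str.len (PySem.Str.strip ((PySem.List.pyGet? lines i).getD "")) ≠ 0 then i else start_idx) := by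
  induction X with
  | nil => simp [trimB]
  | cons a X ih => by_cases h : PySem.Str.len (PySem.Str.strip ((PySem.List.pyGet? lines a).getD "")) ≠ 0 <;>
      simp [trimB, ih]

-- A's loop equals B's collect-then-backward-trim on any index list
lemma loop_eq_trim (lines : List String) (indent : Int) (L : List Int) :
    ∀ last : Int, pyA_loop lines indent L last = trimB lines ((collectB lines indent L).reverse) last := by
  induction L with
  | nil => intro last; simp [pyA_loop, collectB, trimB]
  | cons i L ih =>
    intro last
    simp only [pyA_loop, collectB]
    by_cases hb : PySem.Str.len (PySem.Str.strip ((PySem.List.pyGet? lines i).getD "")) = 0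
    · -- blank line: A skips; B collects it, and the backward trim skips it
      rw [if_pos hb, if_neg (fun h => h.1 hb), List.reverse_cons, trimB_append,
        if_neg (fun h : _ ≠ _ => h hb), ih]
    · by_cases hl : leadingIndentPy ((PySem.List.pyGet? lines i).getD "") ≤ indent
      · -- stop line: A returns last_content; B collects nothing
        rw [if_neg hb, if_pos hl, if_pos ⟨hb, hl⟩, List.reverse_nil]; rfl
      · -- content line: A updates last_content to i; B collects i, trim default becomes i
        rw [if_neg hb, if_neg hl, if_neg (fun h => hl h.2), List.reverse_cons, trimB_append,
          if_pos hb, ih]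

-- ===== VERDICT (by name: the statement is the Claim_ definition above) =====
theorem python_block_end_py_spec : Claim_equal_python_block_end_py := by
  intro lines start_idx indent _ _
  unfold Spec_python_block_end_py python_block_end_py python_block_end_py_alt
  exact loop_eq_trim lines indent _ start_idx
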